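-- pv_equiv track=rewrite | github.com/mgorgei/codeeval | c107.py | f
-- ===== SOURCE A (Python) =====
-- def f(test):
--     for i in range(1,40):
--         tempstr = test[0:i]
--         for j in range(0,len(test), i):
--             if tempstr != test[j:j+i]:
--                 break
--         else:
--             return i
--     return i
-- ===== SOURCE B (Python) =====
-- def f(test):
--     n = len(test)
--     return next((i for i in range(1, 40)
--                  if n % i == 0 and test[:i] * (n // i) == test), 39)
-- ===== Notes on version B (the rewrite author's own statement) =====
-- stated objective: simpler
-- what changed: Replaces A's inner per-chunk comparison loop (with break/for-else) by a divisibility guard plus a single whole-string prefix-repetition equality, selected with next() over a generator.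
import Mathlib
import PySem

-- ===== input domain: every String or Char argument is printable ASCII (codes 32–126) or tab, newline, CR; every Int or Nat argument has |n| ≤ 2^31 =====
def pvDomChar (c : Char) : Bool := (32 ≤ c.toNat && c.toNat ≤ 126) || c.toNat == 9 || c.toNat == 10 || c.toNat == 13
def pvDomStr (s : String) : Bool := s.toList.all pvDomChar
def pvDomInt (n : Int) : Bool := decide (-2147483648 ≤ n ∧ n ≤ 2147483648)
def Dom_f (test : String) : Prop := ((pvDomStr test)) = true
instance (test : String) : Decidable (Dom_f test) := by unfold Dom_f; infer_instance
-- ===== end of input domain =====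

-- B replaces A's inner per-chunk comparison loop by a divisibility guard plus one
-- prefix-repetition equality check picked with next()/find? (objective: simpler).

-- ===== PORT A =====
-- inner 'for j … break / else: return i' succeeds iff every chunk equals tempstr
def pvChunkOk (cs : List Char) (i : Int) : Bool :=
  (PySem.List.pyRange 0 (cs.length : Int) i).all
    (fun j => PySem.List.slice cs (some 0) (some i) == PySem.List.slice cs (some j) (some (j + i)))

-- outer 'for i in range(1,40): … return i / return i' (i = 39 left over when no i succeeds)
def pvLoopA (cs : List Char) : List Int → Int
  | [] => 39
  | i :: rest => if pvChunkOk cs i then i else pvLoopA cs rest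

def f (test : String) : Int := pvLoopA test.toList (PySem.List.pyRange 1 40 1)

-- ===== PORT B =====
-- 'n % i == 0 and test[:i] * (n // i) == test'
def pvRepOk (cs : List Char) (i : Int) : Bool :=
  (PySem.Int.mod (cs.length : Int) i == 0) &&
  ((List.replicate (PySem.Int.floordiv (cs.length : Int) i).toNat
      (PySem.List.slice cs none (some i))).flatten == cs)

-- next((i for i in range(1,40) if …), 39)
def f_alt (test : String) : Int :=
  ((PySem.List.pyRange 1 40 1).find? (pvRepOk test.toList)).getD 39

-- ===== PRECONDITION & SPEC =====
def Spec_f (test : String) (out : Int) : Prop := out = f_alt test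
instance (test : String) (out : Int) : Decidable (Spec_f test out) := by unfold Spec_f; infer_instance

-- ===== CLAIM (what is proved, stated in full; the proofs are below) =====
def Claim_equal_f : Prop := ∀ (test : String), Dom_f test → Spec_f test (f test)

-- ===== LEMMAS AND PROOFS =====

-- A's loop returns the first success, default 39
theorem pvLoopA_eq_find (cs : List Char) (l : List Int) :
    pvLoopA cs l = ((l.find? (pvChunkOk cs)).getD 39) := by
  induction l with
  | nil => rfl
  | cons i rest ih =>
    by_cases h : pvChunkOk cs i
    · simp [pvLoopA, List.find?, h]
    · simp only [pvLoopA, List.find?]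
      rw [if_neg h, ih]
      simp [h]

-- the plain "all chunks equal the prefix" reading of A's guard
def pvPeriodic (cs : List Char) (m : Nat) : Prop :=
  ∀ k : Nat, k * m < cs.length → (cs.drop (k * m)).take m = cs.take m

theorem chunkOk_iff (cs : List Char) (m : Nat) (hm : 0 < m) :
    pvChunkOk cs (m : Int) = true ↔ pvPeriodic cs m := by
  unfold pvChunkOk
  rw [List.all_eq_true]
  constructor
  · intro h k hk
    have hmem : ((k * m : Nat) : Int) ∈ PySem.List.pyRange 0 (cs.length : Int) (m : Int) := by
      rw [PySem.List.mem_pyRange_iff_of_pos (by exact_mod_cast hm)]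
      refine ⟨by positivity, by exact_mod_cast hk, ⟨(k : Int), by push_cast; ring⟩⟩
    have h2 := h _ hmem
    rw [beq_iff_eq, PySem.List.slice_zero_start, PySem.List.slice_to_natCast] at h2
    rw [show ((k * m : Nat) : Int) + (m : Int) = ((k * m : Nat) : Int) + ((m : Nat) : Int) from rfl,
        PySem.List.slice_natCast_add cs (k * m) m] at h2
    exact h2.symm
  · intro h j hj
    rw [PySem.List.mem_pyRange_iff_of_pos (by exact_mod_cast hm)] at hj
    obtain ⟨hj0, hjn, c, hc⟩ := hj
    have hc0 : 0 ≤ c := by nlinarith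
    obtain ⟨k, rfl⟩ : ∃ k : Nat, j = ((k * m : Nat) : Int) := by
      refine ⟨c.toNat, ?_⟩
      push_cast
      rw [Int.toNat_of_nonneg hc0]
      linarith [mul_comm (m : Int) c]
    rw [beq_iff_eq, PySem.List.slice_zero_start, PySem.List.slice_to_natCast,
        show ((k * m : Nat) : Int) + (m : Int) = ((k * m : Nat) : Int) + ((m : Nat) : Int) from rfl,
        PySem.List.slice_natCast_add cs (k * m) m]
    exact (h k (by exact_mod_cast hjn)).symm

theorem repOk_iff (cs : List Char) (m : Nat) (_hm : 0 < m) :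
    pvRepOk cs (m : Int) = true ↔
      (cs.length % m = 0 ∧ (List.replicate (cs.length / m) (cs.take m)).flatten = cs) := by
  simp only [pvRepOk, PySem.Int.mod_natCast, PySem.Int.floordiv_natCast,
    PySem.List.slice_to_natCast, Int.toNat_natCast, Bool.and_eq_true, beq_iff_eq,
    Nat.cast_eq_zero]

-- chunk structure of a flattened replicate
theorem drop_take_flatten_replicate (p : List Char) (m : Nat) (hp : p.length = m) :
    ∀ (k q : Nat), k < q →
      ((List.flatten (List.replicate q p)).drop (k * m)).take m = p := by
  intro k
  induction k with
  | zero =>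
    intro q hq
    obtain ⟨q', rfl⟩ : ∃ q', q = q' + 1 := ⟨q - 1, by omega⟩
    simp only [List.replicate_succ, List.flatten_cons, Nat.zero_mul, List.drop_zero]
    rw [← hp, List.take_left]
  | succ k ih =>
    intro q hq
    obtain ⟨q', rfl⟩ : ∃ q', q = q' + 1 := ⟨q - 1, by omega⟩
    have hstep : (k + 1) * m = p.length + k * m := by rw [hp]; ring
    simp only [List.replicate_succ, List.flatten_cons, hstep]
    rw [List.drop_length_add_append]
    exact ih q' (by omega)

-- periodicity forces divisibility and the replicate decomposition
theorem periodic_imp (cs : List Char) (m : Nat) (hm : 0 < m) (hn : m ≤ cs.length)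
    (h : pvPeriodic cs m) :
    cs.length % m = 0 ∧ (List.replicate (cs.length / m) (cs.take m)).flatten = cs := by
  have hd : cs.length % m = 0 := by
    by_contra hnd
    have hle : cs.length / m * m ≤ cs.length := Nat.div_mul_le_self _ _
    have hlt : cs.length / m * m < cs.length := by
      rcases lt_or_eq_of_le hle with h' | h'
      · exact h'
      · exact absurd (Nat.dvd_iff_mod_eq_zero.mp
          ⟨cs.length / m, by rw [mul_comm]; exact h'.symm⟩) hnd
    have hchunk := h (cs.length / m) hlt
    have hlen := congrArg List.length hchunk
    simp only [List.length_take, List.length_drop] at hlen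
    have e1 := Nat.div_add_mod cs.length m
    have e2 : cs.length / m * m = m * (cs.length / m) := mul_comm _ _
    have hmlt := Nat.mod_lt cs.length hm
    omega
  refine ⟨hd, ?_⟩
  have hdvd : m ∣ cs.length := Nat.dvd_iff_mod_eq_zero.mpr hd
  have hq : cs.length = cs.length / m * m := (Nat.div_mul_cancel hdvd).symm
  have key : ∀ (q : Nat) (xs : List Char), xs.length = q * m →
      (∀ k, k < q → (xs.drop (k * m)).take m = xs.take m) →
      (List.replicate q (xs.take m)).flatten = xs := by
    intro q
    induction q with
    | zero =>
      intro xs hlen _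
      simp at hlen
      simp [hlen]
    | succ q ih =>
      intro xs hlen hk
      have hmle : m ≤ xs.length := by rw [hlen]; nlinarith
      rcases Nat.eq_zero_or_pos q with rfl | hq0
      · have hx : xs.take m = xs := List.take_of_length_le (by omega)
        simp [hx]
      · have htl : (xs.drop m).length = q * m := by
          simp only [List.length_drop, hlen]
          ring_nf
          omega
        have htlk : ∀ k, k < q → ((xs.drop m).drop (k * m)).take m = (xs.drop m).take m := by
          intro k hklt
          rw [List.drop_drop]
          have h1 : (xs.drop (m + k * m)).take m = xs.take m := by
            have h3 := hk (k + 1) (by omega)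
            rwa [show (k + 1) * m = m + k * m by ring] at h3
          have h2 : (xs.drop m).take m = xs.take m := by
            have h3 := hk 1 (by omega)
            rwa [one_mul] at h3
          rw [h1, h2]
        have hIH := ih (xs.drop m) htl htlk
        have hfirst : (xs.drop m).take m = xs.take m := by
          have h3 := hk 1 (by omega)
          rwa [one_mul] at h3
        rw [hfirst] at hIH
        calc (List.replicate (q + 1) (xs.take m)).flatten
            = xs.take m ++ (List.replicate q (xs.take m)).flatten := by
              simp [List.replicate_succ]
          _ = xs.take m ++ xs.drop m := by rw [hIH]
          _ = xs := List.take_append_drop m xs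
  refine key (cs.length / m) cs hq ?_
  intro k hklt
  refine h k ?_
  calc k * m < cs.length / m * m := (Nat.mul_lt_mul_right hm).mpr hklt
    _ ≤ cs.length := Nat.div_mul_le_self _ _

theorem periodic_of (cs : List Char) (m : Nat) (hm : 0 < m) (hn : m ≤ cs.length)
    (hd : cs.length % m = 0)
    (he : (List.replicate (cs.length / m) (cs.take m)).flatten = cs) :
    pvPeriodic cs m := by
  intro k hk
  have hp : (cs.take m).length = m := by
    simp only [List.length_take]
    omega
  have hq : cs.length / m * m = cs.length :=
    Nat.div_mul_cancel (Nat.dvd_iff_mod_eq_zero.mpr hd)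
  have hklt : k < cs.length / m := by
    have h1 : k * m < cs.length / m * m := by omega
    exact (Nat.mul_lt_mul_right hm).mp h1
  have h1 := drop_take_flatten_replicate (cs.take m) m hp k (cs.length / m) hklt
  rw [he] at h1
  exact h1

theorem guard_eq (cs : List Char) (m : Nat) (hm : 0 < m) (hn : m ≤ cs.length) :
    pvChunkOk cs (m : Int) = pvRepOk cs (m : Int) := by
  rcases Bool.eq_false_or_eq_true (pvChunkOk cs (m : Int)) with h | h <;>
  rcases Bool.eq_false_or_eq_true (pvRepOk cs (m : Int)) with h' | h' <;>
    rw [h, h'] <;> exfalso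
  · exact absurd ((repOk_iff cs m hm).2 (periodic_imp cs m hm hn
      ((chunkOk_iff cs m hm).1 h))) (by simp [h'])
  · exact absurd ((chunkOk_iff cs m hm).2 (periodic_of cs m hm hn
      ((repOk_iff cs m hm).1 h').1 ((repOk_iff cs m hm).1 h').2)) (by simp [h])
  -- (the true/true and false/false cases are closed by the rewrites themselves)

theorem find?_congr_mem {α : Type} (p q : α → Bool) (l : List α)
    (h : ∀ x ∈ l, p x = q x) : l.find? p = l.find? q := by
  induction l with
  | nil => rfl
  | cons x xs ih =>
    simp only [List.find?]
    rw [h x (by simp)]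
    cases q x
    · exact ih (fun y hy => h y (by simp [hy]))
    · rfl

theorem repOk_self (cs : List Char) (hn : 0 < cs.length) :
    pvRepOk cs (cs.length : Int) = true := by
  rw [repOk_iff cs cs.length hn]
  refine ⟨Nat.mod_self _, ?_⟩
  rw [Nat.div_self hn]
  simp

-- ===== VERDICT (by name: the statement is the Claim_ definition above) =====
theorem f_spec : Claim_equal_f := by
  intro test _
  unfold Spec_f f f_alt
  rw [pvLoopA_eq_find]
  set cs := test.toList with hcs
  set n := cs.length with hn
  congr 1
  by_cases h39 : 39 ≤ n
  · apply find?_congr_mem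
    intro i hi
    rw [PySem.List.mem_pyRange_one] at hi
    obtain ⟨m, rfl⟩ : ∃ m : Nat, i = (m : Int) := ⟨i.toNat, by omega⟩
    exact guard_eq cs m (by exact_mod_cast hi.1) (by omega)
  · by_cases h0 : n = 0
    · have hnil : cs = [] := List.eq_nil_of_length_eq_zero (by omega)
      rw [hnil]
      decide
    · -- 1 ≤ n < 39: split the range at n; both sides return n there
      have h1 : (1:Int) ≤ (n:Int) := by omega
      have h2 : (n:Int) ≤ 40 := by omega
      rw [PySem.List.pyRange_one_append 1 (n:Int) 40 h1 h2]
      rw [List.find?_append, List.find?_append]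
      have hfst : (PySem.List.pyRange 1 (n:Int) 1).find? (pvChunkOk cs)
          = (PySem.List.pyRange 1 (n:Int) 1).find? (pvRepOk cs) := by
        apply find?_congr_mem
        intro i hi
        rw [PySem.List.mem_pyRange_one] at hi
        obtain ⟨m, rfl⟩ : ∃ m : Nat, i = (m : Int) := ⟨i.toNat, by omega⟩
        exact guard_eq cs m (by exact_mod_cast hi.1) (by omega)
      rw [hfst]
      have hcons : PySem.List.pyRange (n:Int) 40 1 = (n:Int) :: PySem.List.pyRange ((n:Int)+1) 40 1 :=
        PySem.List.pyRange_one_cons (by omega)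
      have hB : pvRepOk cs ((n:Int)) = true := repOk_self cs (by omega)
      have hA : pvChunkOk cs ((n:Int)) = true := by rw [guard_eq cs n (by omega) (by omega)]; exact hB
      rw [hcons]
      simp [List.find?, hA, hB]
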